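-- pv_equiv track=rewrite | github.com/CNMD-AMLK/openclaw-HMS | hms/scripts/dream_engine.py | _bfs_simple
-- ===== SOURCE A (Python) =====
-- from typing import Any, Dict, List, Optional
--
-- def _bfs_simple(
--     adj: Dict[int, List[int]],
--     start: int,
--     max_depth: int,
-- ) -> Optional[List[int]]:
--     """Simple BFS returning the longest path found within max_depth."""
--     from collections import deque
--     queue: deque = deque([(start, [start])])
--     longest: List[int] = []
--
--     while queue:
--         curr, path = queue.popleft()
--
--         if len(path) > len(longest):
--             longest = path
--
--         if len(path) >= max_depth:
--             continue
--
--         for neighbor in adj.get(curr, []):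
--             if neighbor not in path:  # avoid cycles
--                 queue.append((neighbor, path + [neighbor]))
--
--     return longest if len(longest) >= 2 else None
-- ===== SOURCE B (Python) =====
-- from typing import Dict, List, Optional
--
-- def _bfs_simple(
--     adj: Dict[int, List[int]],
--     start: int,
--     max_depth: int,
-- ) -> Optional[List[int]]:
--     """Recursive depth-first search with an explicit remaining-depth budget:
--     each call returns the longest simple path in its subtree (first one found
--     on ties), so no frontier queue is needed.  The first-in-preorder
--     maximum-length path equals the first-in-level-order one the original BFS
--     keeps, because both orders agree within a single depth level."""
--
--     def dfs(curr: int, path: List[int], budget: int) -> List[int]: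
--         best = path
--         if budget <= 0:
--             return best
--         for n in adj.get(curr, []):
--             if n not in path:
--                 cand = dfs(n, path + [n], budget - 1)
--                 if len(cand) > len(best):
--                     best = cand
--         return best
--
--     best = dfs(start, [start], max_depth - 1)
--     return best if len(best) >= 2 else None
-- ===== Notes on version B (the rewrite author's own statement) =====
-- stated objective: alternative
-- what changed: Replaces the FIFO-queue breadth-first frontier loop with a recursive depth-first helper that returns the longest simple path of each subtree (no frontier data structure at all); the strict '>' update keeps the same first-found maximum-length path because preorder and level order agree within a single depth level.
import Mathlib
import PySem

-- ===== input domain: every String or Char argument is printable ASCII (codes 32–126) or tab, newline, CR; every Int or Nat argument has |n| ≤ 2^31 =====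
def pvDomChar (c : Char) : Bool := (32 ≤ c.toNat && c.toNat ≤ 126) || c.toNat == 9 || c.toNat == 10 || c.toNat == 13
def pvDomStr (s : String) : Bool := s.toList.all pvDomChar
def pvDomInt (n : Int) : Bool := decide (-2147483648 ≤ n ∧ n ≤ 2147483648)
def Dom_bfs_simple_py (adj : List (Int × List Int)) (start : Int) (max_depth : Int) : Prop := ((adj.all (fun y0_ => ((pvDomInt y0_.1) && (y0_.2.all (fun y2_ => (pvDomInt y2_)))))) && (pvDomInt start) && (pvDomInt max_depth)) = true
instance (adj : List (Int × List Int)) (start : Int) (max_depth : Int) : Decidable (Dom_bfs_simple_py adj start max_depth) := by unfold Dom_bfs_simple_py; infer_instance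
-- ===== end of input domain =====

-- B replaces A's FIFO-queue frontier loop by a recursive depth-first helper that
-- RETURNS the longest simple path of each subtree; objective: alternative algorithm.

-- Helpers for A's termination argument only: the eligible extensions of one queue
-- entry, and a weighted measure on queues.
def pvStep (adj : List (Int × List Int)) (D : Int) (x : Int × List Int) : List (Int × List Int) :=
  if (x.2.length : Int) < D then
    ((List.lookup x.1 adj).getD []).filterMap
      (fun n => if n ∈ x.2 then none else some (n, x.2 ++ [n]))
  else []

def pvMaxV (adj : List (Int × List Int)) : Nat :=
  adj.foldr (fun kv m => max kv.2.length m) 0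

def pvWt (adj : List (Int × List Int)) (D : Int) (x : Int × List Int) : Nat :=
  (pvMaxV adj + 2) ^ ((D - (x.2.length : Int)).toNat)

def pvMu (adj : List (Int × List Int)) (D : Int) (st : List (Int × List Int)) : Nat :=
  (st.map (pvWt adj D)).sum

theorem pv_lookup_len_le (adj : List (Int × List Int)) (c : Int) :
    ((List.lookup c adj).getD []).length ≤ pvMaxV adj := by
  induction adj with
  | nil => simp [List.lookup, pvMaxV]
  | cons kv t ih =>
    simp only [List.lookup, pvMaxV, List.foldr] at *
    by_cases h : c == kv.1
    · simp [h]
    · simp only [h]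
      exact le_trans ih (le_max_right _ _)

theorem pv_step_len (adj : List (Int × List Int)) (D : Int) (x y : Int × List Int)
    (hy : y ∈ pvStep adj D x) : y.2.length = x.2.length + 1 := by
  unfold pvStep at hy
  split at hy
  · obtain ⟨n, _, hn⟩ := List.mem_filterMap.mp hy
    split at hn
    · simp at hn
    · cases hn; simp
  · simp at hy

theorem pv_step_count (adj : List (Int × List Int)) (D : Int) (x : Int × List Int) :
    (pvStep adj D x).length ≤ pvMaxV adj := by
  unfold pvStep
  split
  · exact le_trans (List.length_filterMap_le _ _) (pv_lookup_len_le adj x.1)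
  · simp

theorem pv_wt_pos (adj : List (Int × List Int)) (D : Int) (x : Int × List Int) :
    0 < pvWt adj D x := Nat.pow_pos (by omega)

theorem pv_mu_append (adj : List (Int × List Int)) (D : Int) (s t : List (Int × List Int)) :
    pvMu adj D (s ++ t) = pvMu adj D s + pvMu adj D t := by
  simp [pvMu]

theorem pv_sum_le_card_mul (l : List Nat) (c : Nat) (h : ∀ x ∈ l, x ≤ c) :
    l.sum ≤ l.length * c := by
  induction l with
  | nil => simp
  | cons a t ih =>
    rw [List.sum_cons, List.length_cons, Nat.succ_mul, Nat.add_comm (t.length * c) c]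
    exact Nat.add_le_add (h a List.mem_cons_self)
      (ih (fun x hx => h x (List.mem_cons_of_mem a hx)))

theorem pv_mu_step_lt (adj : List (Int × List Int)) (D : Int) (x : Int × List Int) :
    pvMu adj D (pvStep adj D x) < pvWt adj D x := by
  by_cases h : (x.2.length : Int) < D
  · have hpos : 0 < (D - (x.2.length : Int)).toNat := by
      exact_mod_cast Int.lt_toNat.mpr (by exact_mod_cast Int.sub_pos.mpr h)
    have hd : (D - (x.2.length : Int)).toNat
        = ((D - (x.2.length : Int)).toNat - 1) + 1 := (Nat.succ_pred_eq_of_pos hpos).symm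
    have hle : ∀ w ∈ (pvStep adj D x).map (pvWt adj D),
        w ≤ (pvMaxV adj + 2) ^ ((D - (x.2.length : Int)).toNat - 1) := by
      intro w hw
      obtain ⟨y, hy, rfl⟩ := List.mem_map.mp hw
      have hlen := pv_step_len adj D x y hy
      have hc : (y.2.length : Int) = (x.2.length : Int) + 1 := by
        rw [hlen]; push_cast; ring
      have hsub : D - (y.2.length : Int) = (D - (x.2.length : Int)) - 1 := by
        rw [hc]; ring
      have he : (D - ((y.2.length : Int))).toNat
          = (D - (x.2.length : Int)).toNat - 1 := by
        rw [hsub, Int.pred_toNat]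
      unfold pvWt
      rw [he]
    have hsum := pv_sum_le_card_mul ((pvStep adj D x).map (pvWt adj D)) _ hle
    rw [List.length_map] at hsum
    have hcnt := pv_step_count adj D x
    have hpow : 0 < (pvMaxV adj + 2) ^ ((D - (x.2.length : Int)).toNat - 1) :=
      Nat.pow_pos (Nat.succ_pos (pvMaxV adj + 1))
    calc pvMu adj D (pvStep adj D x)
        ≤ (pvStep adj D x).length * (pvMaxV adj + 2) ^ ((D - (x.2.length : Int)).toNat - 1) := hsum
      _ ≤ pvMaxV adj * (pvMaxV adj + 2) ^ ((D - (x.2.length : Int)).toNat - 1) :=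
          Nat.mul_le_mul_right _ hcnt
      _ < (pvMaxV adj + 2) * (pvMaxV adj + 2) ^ ((D - (x.2.length : Int)).toNat - 1) :=
          Nat.mul_lt_mul_of_lt_of_le
            (Nat.lt_add_of_pos_right (Nat.succ_pos 1)) (Nat.le_refl _) hpow
      _ = (pvMaxV adj + 2) ^ (((D - (x.2.length : Int)).toNat - 1) + 1) := by
          rw [pow_succ, Nat.mul_comm]
      _ = pvWt adj D x := by unfold pvWt; rw [← hd]
  · have hstep : pvStep adj D x = [] := by unfold pvStep; rw [if_neg h]
    rw [hstep]
    exact pv_wt_pos adj D x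

theorem pv_mu_tail_lt (adj : List (Int × List Int)) (D : Int) (x : Int × List Int)
    (rest : List (Int × List Int)) : pvMu adj D rest < pvMu adj D (x :: rest) := by
  have := pv_wt_pos adj D x
  simp [pvMu]; omega

theorem pv_mu_bfs_lt (adj : List (Int × List Int)) (D : Int) (x : Int × List Int)
    (rest : List (Int × List Int)) :
    pvMu adj D (rest ++ pvStep adj D x) < pvMu adj D (x :: rest) := by
  have h1 := pv_mu_step_lt adj D x
  rw [pv_mu_append]
  simp [pvMu] at *; omega

-- The queue-extension loop of A, written as it runs (append eligible neighbours at
-- the back), equals appending the `pvStep` block: used by A's termination proof.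
theorem pv_qfold_eq (p : List Int) (ns : List Int) (rest : List (Int × List Int)) :
    ns.foldl (fun q n => if n ∈ p then q else q ++ [(n, p ++ [n])]) rest
      = rest ++ ns.filterMap (fun n => if n ∈ p then none else some (n, p ++ [n])) := by
  induction ns generalizing rest with
  | nil => simp
  | cons a t ih =>
    simp only [List.foldl, List.filterMap]
    by_cases h : a ∈ p
    · simp [h, ih]
    · simp [h, ih]

-- The two decrease facts of A's loop, packaged so the loop's decreasing_by is one
-- `exact` each.
theorem pv_bfs_dec1 (adj : List (Int × List Int)) (D : Int) (curr : Int) (path : List Int)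
    (rest : List (Int × List Int)) : pvMu adj D rest < pvMu adj D ((curr, path) :: rest) :=
  pv_mu_tail_lt adj D (curr, path) rest

theorem pv_bfs_dec2 (adj : List (Int × List Int)) (D : Int) (curr : Int) (path : List Int)
    (rest : List (Int × List Int)) (h : ¬ D ≤ (path.length : Int)) :
    pvMu adj D (((List.lookup curr adj).getD []).foldl
        (fun q n => if n ∈ path then q else q ++ [(n, path ++ [n])]) rest)
      < pvMu adj D ((curr, path) :: rest) := by
  rw [pv_qfold_eq]
  have hs : pvStep adj D (curr, path)
      = ((List.lookup curr adj).getD []).filterMap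
          (fun n => if n ∈ path then none else some (n, path ++ [n])) := by
    unfold pvStep; rw [if_pos (show ((path.length : Int) < D) by omega)]
  rw [← hs]
  exact pv_mu_bfs_lt adj D (curr, path) rest

-- ===== PORT A =====
-- FIFO queue of (current, path); pop front, update `longest`, append eligible
-- extensions at the back (transliteration of the Python while/deque loop).
def pvBfsLoop (adj : List (Int × List Int)) (D : Int)
    (queue : List (Int × List Int)) (longest : List Int) : List Int :=
  match queue with
  | [] => longest
  | (curr, path) :: rest =>
    let longest' := if longest.length < path.length then path else longest
    if h : D ≤ (path.length : Int) then
      pvBfsLoop adj D rest longest'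
    else
      pvBfsLoop adj D
        (((List.lookup curr adj).getD []).foldl
          (fun q n => if n ∈ path then q else q ++ [(n, path ++ [n])]) rest)
        longest'
termination_by pvMu adj D queue
decreasing_by
  · exact pv_bfs_dec1 adj D curr path rest
  · exact pv_bfs_dec2 adj D curr path rest h

def bfs_simple_py (adj : List (Int × List Int)) (start : Int) (max_depth : Int) : Option (List Int) :=
  let longest := pvBfsLoop adj max_depth [(start, [start])] []
  if 2 ≤ longest.length then some longest else none

-- ===== PORT B =====
-- Recursive DFS with an explicit remaining-depth budget: `pvDfs` is the `dfs`
-- helper of Source B and returns the longest simple path of the subtree rooted at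
-- `path`.  The budget is a Nat (structural recursion); Source B's `budget <= 0`
-- early return is the `0` case, and the negative initial budget a non-positive
-- `max_depth` produces is `.toNat`-clamped to that same `0` case.
def pvDfs (adj : List (Int × List Int)) (budget : Nat) (curr : Int) (path : List Int) : List Int :=
  match budget with
  | 0 => path
  | b + 1 =>
    ((List.lookup curr adj).getD []).foldl
      (fun best n =>
        if n ∈ path then best
        else
          let cand := pvDfs adj b n (path ++ [n])
          if best.length < cand.length then cand else best)
      path

def bfs_simple_py_alt (adj : List (Int × List Int)) (start : Int) (max_depth : Int) : Option (List Int) :=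
  let best := pvDfs adj (max_depth - 1).toNat start [start]
  if 2 ≤ best.length then some best else none

-- ===== PRECONDITION & SPEC =====
def Spec_bfs_simple_py (adj : List (Int × List Int)) (start : Int) (max_depth : Int) (out : Option (List Int)) : Prop := out = bfs_simple_py_alt adj start max_depth
instance (adj : List (Int × List Int)) (start : Int) (max_depth : Int) (out : Option (List Int)) : Decidable (Spec_bfs_simple_py adj start max_depth out) := by unfold Spec_bfs_simple_py; infer_instance

-- ===== CLAIM (what is proved, stated in full; the proofs are below) =====
def Claim_equal_bfs_simple_py : Prop := ∀ (adj : List (Int × List Int)) (start : Int) (max_depth : Int), Dom_bfs_simple_py adj start max_depth → Spec_bfs_simple_py adj start max_depth (bfs_simple_py adj start max_depth)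

-- ===== LEMMAS AND PROOFS =====

-- The "keep the strictly longer path" update both programs perform.
def pvChoose (b p : List Int) : List Int := if b.length < p.length then p else b

-- Level-order (BFS) and preorder (DFS) listings of the simple-path tree.
def pvBl (adj : List (Int × List Int)) (D : Int) : List (Int × List Int) → List (List Int)
  | [] => []
  | x :: rest => x.2 :: pvBl adj D (rest ++ pvStep adj D x)
termination_by st => pvMu adj D st
decreasing_by exact pv_mu_bfs_lt adj D x rest

def pvMuD (adj : List (Int × List Int)) (D : Int) (st : List (Int × List Int)) : Nat :=
  pvMu adj D st

theorem pv_mu_dfs_lt (adj : List (Int × List Int)) (D : Int) (x : Int × List Int)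
    (st : List (Int × List Int)) :
    pvMu adj D (pvStep adj D x ++ st) < pvMu adj D (x :: st) := by
  have h1 := pv_mu_step_lt adj D x
  rw [pv_mu_append]
  simp [pvMu] at *; omega

def pvDl (adj : List (Int × List Int)) (D : Int) : List (Int × List Int) → List (List Int)
  | [] => []
  | x :: st => x.2 :: pvDl adj D (pvStep adj D x ++ st)
termination_by st => pvMu adj D st
decreasing_by exact pv_mu_dfs_lt adj D x st

-- The entries at absolute depth k below one entry (the level decomposition).
def pvCtbAux (adj : List (Int × List Int)) (D : Int) : Nat → (Int × List Int) → List (Int × List Int)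
  | 0, x => [x]
  | j + 1, x => (pvStep adj D x).flatMap (pvCtbAux adj D j)

def pvCtb (adj : List (Int × List Int)) (D : Int) (k : Nat) (x : Int × List Int) :
    List (Int × List Int) :=
  if x.2.length ≤ k then pvCtbAux adj D (k - x.2.length) x else []

def pvMx (l : List (List Int)) : Nat := l.foldr (fun p m => max p.length m) 0

theorem pv_mu_eq_zero (adj : List (Int × List Int)) (D : Int) (st : List (Int × List Int))
    (h : pvMu adj D st = 0) : st = [] := by
  cases st with
  | nil => rfl
  | cons x t =>
    exfalso
    have := pv_wt_pos adj D x
    simp [pvMu] at h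
    omega

theorem pv_flatMap_ctb_gt (adj : List (Int × List Int)) (D : Int) (k : Nat)
    (l : List (Int × List Int)) (hl : ∀ y ∈ l, k < y.2.length) :
    l.flatMap (pvCtb adj D k) = [] := by
  induction l with
  | nil => simp
  | cons x t ih =>
    have hx := hl x (by simp)
    simp only [List.flatMap_cons]
    rw [show pvCtb adj D k x = [] from by unfold pvCtb; rw [if_neg (by omega)]]
    simp only [List.nil_append]
    exact ih (fun y hy => hl y (by simp [hy]))

theorem pv_ctb_unfold (adj : List (Int × List Int)) (D : Int) (k : Nat)
    (x : Int × List Int) (h : x.2.length ≠ k) :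
    pvCtb adj D k x = (pvStep adj D x).flatMap (pvCtb adj D k) := by
  by_cases hlt : x.2.length < k
  · have : pvCtb adj D k x = pvCtbAux adj D (k - x.2.length) x := by
      unfold pvCtb; rw [if_pos (by omega)]
    rw [this]
    have hj : k - x.2.length = (k - x.2.length - 1) + 1 := by omega
    rw [hj]
    simp only [pvCtbAux]
    apply List.flatMap_congr
    intro y hy
    have hy' := pv_step_len adj D x y hy
    unfold pvCtb
    rw [if_pos (by omega)]
    congr 1
    omega
  · have hgt : k < x.2.length := by omega
    rw [show pvCtb adj D k x = [] from by unfold pvCtb; rw [if_neg (by omega)]]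
    rw [pv_flatMap_ctb_gt adj D k _ (fun y hy => by have := pv_step_len adj D x y hy; omega)]

theorem pv_mu_flatMap_lt (adj : List (Int × List Int)) (D : Int)
    (q : List (Int × List Int)) (hq : q ≠ []) :
    pvMu adj D (q.flatMap (pvStep adj D)) < pvMu adj D q := by
  induction q with
  | nil => exact absurd rfl hq
  | cons x t ih =>
    simp only [List.flatMap_cons]
    rw [pv_mu_append]
    have h1 := pv_mu_step_lt adj D x
    by_cases ht : t = []
    · subst ht; simp [pvMu] at *; omega
    · have h2 := ih ht
      simp [pvMu] at *
      omega

theorem pv_len_le_mx (l : List (List Int)) (p : List Int) (hp : p ∈ l) :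
    p.length ≤ pvMx l := by
  induction l with
  | nil => simp at hp
  | cons q t ih =>
    simp only [pvMx, List.foldr] at *
    rcases List.mem_cons.mp hp with h | h
    · subst h; omega
    · have := ih h; omega

theorem pv_mx_le (l : List (List Int)) (m : Nat) (h : ∀ p ∈ l, p.length ≤ m) :
    pvMx l ≤ m := by
  induction l with
  | nil => simp [pvMx]
  | cons q t ih =>
    have h1 := h q (by simp)
    have h2 := ih (fun p hp => h p (by simp [hp]))
    simp only [pvMx, List.foldr] at *
    omega

theorem pv_find?_filter (l : List (List Int)) (p : List Int → Bool) :
    l.find? p = (l.filter p).head? := by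
  induction l with
  | nil => simp
  | cons x t ih =>
    by_cases h : p x
    · simp [List.find?_cons_of_pos h, List.filter_cons_of_pos h]
    · rw [List.find?_cons_of_neg (by simpa using h), List.filter_cons_of_neg (by simpa using h), ih]

theorem pv_bfsLoop_fold (adj : List (Int × List Int)) (D : Int) :
    ∀ (n : Nat) (st : List (Int × List Int)) (best : List Int), pvMu adj D st ≤ n →
    pvBfsLoop adj D st best = (pvBl adj D st).foldl pvChoose best := by
  intro n
  induction n with
  | zero =>
    intro st best h
    rw [pv_mu_eq_zero adj D st (by omega)]
    rw [pvBfsLoop, pvBl]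
    rfl
  | succ n ih =>
    intro st best h
    match st with
    | [] => rw [pvBfsLoop, pvBl]; rfl
    | (c, p) :: rest =>
      rw [pvBfsLoop, pvBl]
      simp only [dite_eq_ite]
      by_cases hd : D ≤ (p.length : Int)
      · rw [if_pos hd]
        have hstep : pvStep adj D (c, p) = [] := by
          unfold pvStep; rw [if_neg (show ¬ ((p.length : Int) < D) by omega)]
        rw [hstep, List.append_nil, List.foldl_cons]
        have hmu : pvMu adj D rest ≤ n := by
          have := pv_mu_tail_lt adj D (c, p) rest
          omega
        rw [ih rest _ hmu]
        rfl
      · rw [if_neg hd, pv_qfold_eq]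
        have hs : ((List.lookup c adj).getD []).filterMap
            (fun n => if n ∈ p then none else some (n, p ++ [n])) = pvStep adj D (c, p) := by
          unfold pvStep; rw [if_pos (show ((p.length : Int) < D) by omega)]
        rw [hs, List.foldl_cons]
        have hmu : pvMu adj D (rest ++ pvStep adj D (c, p)) ≤ n := by
          have := pv_mu_bfs_lt adj D (c, p) rest
          omega
        rw [ih _ _ hmu]
        rfl

-- preorder listing splits over stack concatenation
theorem pv_dl_append (adj : List (Int × List Int)) (D : Int) :
    ∀ (n : Nat) (s t : List (Int × List Int)), pvMu adj D s ≤ n →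
    pvDl adj D (s ++ t) = pvDl adj D s ++ pvDl adj D t := by
  intro n
  induction n with
  | zero =>
    intro s t h
    rw [pv_mu_eq_zero adj D s (by omega)]
    simp [pvDl]
  | succ n ih =>
    intro s t h
    match s with
    | [] => simp [pvDl]
    | x :: s' =>
      rw [List.cons_append, pvDl, pvDl, ← List.append_assoc]
      have hmu : pvMu adj D (pvStep adj D x ++ s') ≤ n := by
        have := pv_mu_dfs_lt adj D x s'
        omega
      rw [ih _ _ hmu]
      simp

-- pvChoose picks the leftmost longest, hence these algebraic laws
theorem pv_choose_assoc (a b c : List Int) :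
    pvChoose (pvChoose a b) c = pvChoose a (pvChoose b c) := by
  unfold pvChoose
  split_ifs with h1 h2 h3 h4 <;> first | rfl | omega

theorem pv_choose_foldl (b a : List Int) (l : List (List Int)) :
    pvChoose b (l.foldl pvChoose a) = l.foldl pvChoose (pvChoose b a) := by
  induction l generalizing a with
  | nil => rfl
  | cons x t ih =>
    simp only [List.foldl_cons]
    rw [ih, pv_choose_assoc]

-- B's recursion computes the pvChoose-fold of the preorder listing.
theorem pv_dfs_fold (adj : List (Int × List Int)) (D : Int) :
    ∀ (b : Nat) (c : Int) (p : List Int), b = (D - (p.length : Int)).toNat →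
    pvDfs adj b c p = (pvDl adj D (pvStep adj D (c, p))).foldl pvChoose p := by
  intro b
  induction b with
  | zero =>
    intro c p h
    have hstep : pvStep adj D (c, p) = [] := by
      unfold pvStep; rw [if_neg (show ¬ ((p.length : Int) < D) by omega)]
    rw [pvDfs, hstep, pvDl]
    rfl
  | succ b ih =>
    intro c p h
    have hlt : (p.length : Int) < D := by omega
    have hs : pvStep adj D (c, p)
        = ((List.lookup c adj).getD []).filterMap
            (fun n => if n ∈ p then none else some (n, p ++ [n])) := by
      unfold pvStep; rw [if_pos (show ((p.length : Int) < D) by omega)]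
    rw [pvDfs, hs]
    -- inner induction over the neighbour list, with a general accumulator
    have hfor : ∀ (ns : List Int) (best : List Int),
        ns.foldl
          (fun best n =>
            if n ∈ p then best
            else
              let cand := pvDfs adj b n (p ++ [n])
              if best.length < cand.length then cand else best)
          best
          = (pvDl adj D (ns.filterMap
              (fun n => if n ∈ p then none else some (n, p ++ [n])))).foldl pvChoose best := by
      intro ns
      induction ns with
      | nil => intro best; simp [pvDl]
      | cons n t iht =>
        intro best
        simp only [List.foldl_cons, List.filterMap_cons]
        by_cases hn : n ∈ p
        · rw [if_pos hn, if_pos hn]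
          exact iht best
        · rw [if_neg hn, if_neg hn]
          rw [pvDl,
            pv_dl_append adj D (pvMu adj D (pvStep adj D (n, p ++ [n]))) _ _ (le_refl _)]
          have hcand : pvDfs adj b n (p ++ [n])
              = (pvDl adj D (pvStep adj D (n, p ++ [n]))).foldl pvChoose (p ++ [n]) := by
            apply ih
            simp only [List.length_append, List.length_cons, List.length_nil]
            push_cast
            omega
          rw [iht _, List.foldl_cons, List.foldl_append]
          congr 1
          have hch : (if best.length < (pvDfs adj b n (p ++ [n])).length
                    then pvDfs adj b n (p ++ [n]) else best)
              = pvChoose best (pvDfs adj b n (p ++ [n])) := rfl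
          rw [hch, hcand, pv_choose_foldl]
    exact hfor _ p

-- preorder restricted to one level k = concatenation of the depth-k blocks
theorem pv_dl_filter_aux (adj : List (Int × List Int)) (D : Int) (k : Nat) :
    ∀ (n : Nat) (st : List (Int × List Int)), pvMu adj D st ≤ n →
    (pvDl adj D st).filter (fun p => p.length == k)
      = (st.flatMap (pvCtb adj D k)).map Prod.snd := by
  intro n
  induction n with
  | zero =>
    intro st h
    rw [pv_mu_eq_zero adj D st (by omega)]
    simp [pvDl]
  | succ n ih =>
    intro st h
    match st with
    | [] => simp [pvDl]
    | x :: st' =>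
      rw [pvDl]
      have hmu : pvMu adj D (pvStep adj D x ++ st') ≤ n := by
        have := pv_mu_dfs_lt adj D x st'
        omega
      by_cases hk : x.2.length = k
      · rw [List.filter_cons_of_pos (by simpa using hk), ih _ hmu]
        simp only [List.flatMap_append, List.flatMap_cons]
        rw [pv_flatMap_ctb_gt adj D k (pvStep adj D x)
            (fun y hy => by have := pv_step_len adj D x y hy; omega)]
        rw [show pvCtb adj D k x = [x] from by
          unfold pvCtb; rw [if_pos (by omega)]; rw [show k - x.2.length = 0 by omega]; rfl]
        simp
      · rw [List.filter_cons_of_neg (by simpa using hk), ih _ hmu]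
        simp only [List.flatMap_append, List.flatMap_cons]
        rw [pv_ctb_unfold adj D k x hk]

theorem pv_bl_block (adj : List (Int × List Int)) (D : Int)
    (q1 q2 : List (Int × List Int)) :
    pvBl adj D (q1 ++ q2)
      = q1.map Prod.snd ++ pvBl adj D (q2 ++ q1.flatMap (pvStep adj D)) := by
  induction q1 generalizing q2 with
  | nil => simp
  | cons x q1' ih =>
    rw [List.cons_append, pvBl]
    rw [List.append_assoc, ih (q2 ++ pvStep adj D x)]
    simp [List.append_assoc]

theorem pv_bl_filter_aux (adj : List (Int × List Int)) (D : Int) (k : Nat) :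
    ∀ (n : Nat) (ℓ : Nat) (q : List (Int × List Int)), pvMu adj D q ≤ n →
    (∀ y ∈ q, y.2.length = ℓ) →
    (pvBl adj D q).filter (fun p => p.length == k)
      = (q.flatMap (pvCtb adj D k)).map Prod.snd := by
  intro n
  induction n with
  | zero =>
    intro ℓ q h hq
    rw [pv_mu_eq_zero adj D q (by omega)]
    simp [pvBl]
  | succ n ih =>
    intro ℓ q h hq
    by_cases hq0 : q = []
    · subst hq0; simp [pvBl]
    · have hunf : pvBl adj D q = q.map Prod.snd ++ pvBl adj D (q.flatMap (pvStep adj D)) := by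
        have := pv_bl_block adj D q []
        simpa using this
      rw [hunf, List.filter_append]
      have hmu : pvMu adj D (q.flatMap (pvStep adj D)) ≤ n := by
        have := pv_mu_flatMap_lt adj D q hq0
        omega
      have hq' : ∀ y ∈ q.flatMap (pvStep adj D), y.2.length = ℓ + 1 := by
        intro y hy
        obtain ⟨x, hx, hyx⟩ := List.mem_flatMap.mp hy
        rw [pv_step_len adj D x y hyx, hq x hx]
      rw [ih (ℓ + 1) _ hmu hq']
      by_cases hk : k = ℓ
      · subst hk
        have h1 : (q.map Prod.snd).filter (fun p => p.length == k) = q.map Prod.snd := by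
          rw [List.filter_eq_self]
          intro a ha
          obtain ⟨x, hx, rfl⟩ := List.mem_map.mp ha
          simp [hq x hx]
        have h2 : (q.flatMap (pvStep adj D)).flatMap (pvCtb adj D k) = [] :=
          pv_flatMap_ctb_gt adj D k _ (fun y hy => by rw [hq' y hy]; omega)
        have h3 : q.flatMap (pvCtb adj D k) = q := by
          rw [show q.flatMap (pvCtb adj D k) = q.flatMap (fun x => [x]) from
            List.flatMap_congr (fun x hx => by
              unfold pvCtb
              rw [if_pos (by rw [hq x hx]), show k - x.2.length = 0 from by rw [hq x hx]; omega]
              rfl)]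
          simp
        rw [h1, h2, h3]
        simp
      · have h1 : (q.map Prod.snd).filter (fun p => p.length == k) = [] := by
          rw [List.filter_eq_nil_iff]
          intro a ha
          obtain ⟨x, hx, rfl⟩ := List.mem_map.mp ha
          simp [hq x hx]
          omega
        have h3 : q.flatMap (pvCtb adj D k) = (q.flatMap (pvStep adj D)).flatMap (pvCtb adj D k) := by
          rw [List.flatMap_assoc]
          exact List.flatMap_congr (fun x hx => pv_ctb_unfold adj D k x (by rw [hq x hx]; omega))
        rw [h1, h3]
        simp

theorem pv_fold_choose (l : List (List Int)) (b : List Int) :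
    (b :: l).find? (fun p => p.length == pvMx (b :: l)) = some (l.foldl pvChoose b) := by
  induction l generalizing b with
  | nil =>
    simp [pvMx, List.find?]
  | cons p t ih =>
    rw [List.foldl_cons]
    by_cases hbp : b.length < p.length
    · have hc : pvChoose b p = p := by unfold pvChoose; rw [if_pos hbp]
      have hmx : pvMx (b :: p :: t) = pvMx (p :: t) := by
        have h1 : p.length ≤ pvMx (p :: t) := pv_len_le_mx _ _ (by simp)
        simp only [pvMx, List.foldr] at *
        omega
      have hb : (b.length == pvMx (b :: p :: t)) = false := by
        have h1 : p.length ≤ pvMx (p :: t) := pv_len_le_mx _ _ (by simp)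
        rw [hmx]
        simp
        omega
      rw [List.find?_cons_of_neg (by simp [hb]), hmx, hc]
      exact ih p
    · have hc : pvChoose b p = b := by unfold pvChoose; rw [if_neg hbp]
      have hmx : pvMx (b :: p :: t) = pvMx (b :: t) := by
        simp only [pvMx, List.foldr] at *
        omega
      rw [hc]
      by_cases hb : b.length = pvMx (b :: p :: t)
      · rw [List.find?_cons_of_pos (by simp [hb])]
        have := ih b
        rw [List.find?_cons_of_pos (by simp [← hmx, hb])] at this
        exact this
      · have hble : b.length ≤ pvMx (b :: p :: t) := by
          simp only [pvMx, List.foldr]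
          omega
        have hp : (p.length == pvMx (b :: p :: t)) = false := by
          simp only [pvMx, List.foldr] at *
          simp
          omega
        rw [List.find?_cons_of_neg (by simp [hb]), List.find?_cons_of_neg (by simp [hp])]
        have := ih b
        rw [List.find?_cons_of_neg (by simp [← hmx, hb])] at this
        rw [hmx, this]

theorem pv_loops_eq (adj : List (Int × List Int)) (s D : Int) :
    pvBfsLoop adj D [(s, [s])] [] = pvDfs adj (D - 1).toNat s [s] := by
  have hb := pv_bfsLoop_fold adj D (pvMu adj D [(s, [s])]) [(s, [s])] [] (le_refl _)
  have hd := pv_dfs_fold adj D ((D - 1).toNat) s [s] (by simp)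
  rw [hb, hd]
  set l1 := pvBl adj D [(s, [s])] with hl1
  have hl1u : l1 = [s] :: pvBl adj D (pvStep adj D (s, [s])) := by
    rw [hl1, pvBl]; simp
  set l2 := pvDl adj D [(s, [s])] with hl2
  have hl2u : l2 = [s] :: pvDl adj D (pvStep adj D (s, [s])) := by
    rw [hl2, pvDl]; simp
  have hstep1 : (pvDl adj D (pvStep adj D (s, [s]))).foldl pvChoose [s]
      = l2.foldl pvChoose [] := by
    rw [hl2u, List.foldl_cons]
    rfl
  rw [hstep1]
  have hfil : ∀ k : Nat, l1.filter (fun p => p.length == k) = l2.filter (fun p => p.length == k) := by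
    intro k
    rw [hl1, hl2,
      pv_bl_filter_aux adj D k (pvMu adj D [(s, [s])]) 1 [(s, [s])] (le_refl _) (by simp),
      pv_dl_filter_aux adj D k (pvMu adj D [(s, [s])]) [(s, [s])] (le_refl _)]
  have hmx : pvMx l1 = pvMx l2 := by
    have h12 : ∀ (a b : List (List Int)),
        (∀ k : Nat, a.filter (fun p => p.length == k) = b.filter (fun p => p.length == k)) →
        pvMx a ≤ pvMx b := by
      intro a b hab
      apply pv_mx_le
      intro p hp
      have hpf : p ∈ a.filter (fun q => q.length == p.length) := by
        simp [List.mem_filter, hp]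
      rw [hab p.length] at hpf
      exact pv_len_le_mx b p (List.mem_of_mem_filter hpf)
    exact le_antisymm (h12 l1 l2 hfil) (h12 l2 l1 (fun k => (hfil k).symm))
  have h1 := pv_fold_choose l1 []
  have h2 := pv_fold_choose l2 []
  have hmx1 : pvMx ([] :: l1) = pvMx l1 := by simp [pvMx, List.foldr]
  have hmx2 : pvMx ([] :: l2) = pvMx l2 := by simp [pvMx, List.foldr]
  rw [hmx1] at h1
  rw [hmx2] at h2
  by_cases h0 : pvMx l1 = 0
  · rw [List.find?_cons_of_pos (by simp [h0])] at h1
    rw [List.find?_cons_of_pos (by simp [hmx ▸ h0])] at h2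
    have e1 := Option.some.inj h1
    have e2 := Option.some.inj h2
    rw [← e1, ← e2]
  · rw [List.find?_cons_of_neg (by simp; omega)] at h1
    rw [List.find?_cons_of_neg (by simp; rw [← hmx]; omega)] at h2
    rw [pv_find?_filter] at h1 h2
    rw [hfil (pvMx l1)] at h1
    rw [← hmx] at h2
    rw [h1] at h2
    exact Option.some.inj h2

-- ===== VERDICT (by name: the statement is the Claim_ definition above) =====
theorem bfs_simple_py_spec : Claim_equal_bfs_simple_py := by
  intro adj start max_depth _
  unfold Spec_bfs_simple_py bfs_simple_py bfs_simple_py_alt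
  rw [pv_loops_eq adj start max_depth]
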